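-- pv_equiv track=rewrite | github.com/Sinan53x/Codedex-Projects | 2048.py | move_row_down
-- ===== SOURCE A (Python) =====
-- def move_row_down(col):
--     non_zero_numbers = []
--     for number in col:
--             if number != 0:
--                 non_zero_numbers.append(number)
--
--     merged_numbers = []
--
--     i = 0
--     while i < len(non_zero_numbers):
--         if i + 1 < len(non_zero_numbers) and non_zero_numbers[i] == non_zero_numbers[i + 1]:
--             merged_numbers.append(non_zero_numbers[i] + non_zero_numbers[i + 1])
--             i += 2
--         else:
--             merged_numbers.append(non_zero_numbers[i])
--             i += 1
--
--     while len(merged_numbers) < 4: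
--         merged_numbers.insert(0, 0)
--     return merged_numbers
-- ===== SOURCE B (Python) =====
-- def move_row_down(col):
--     result = []
--     last_merged = False
--     for n in col:
--         if n != 0:
--             if result and not last_merged and result[-1] == n:
--                 result[-1] += n
--                 last_merged = True
--             else:
--                 result.append(n)
--                 last_merged = False
--     return [0] * (4 - len(result)) + result
-- ===== Notes on version B (the rewrite author's own statement) =====
-- stated objective: idiomatic
-- what changed: One forward pass with an accumulator list and a last_was_merged flag (zero-skipping fused into it) replaces A's three phases of filter loop, index-jumping while merge, and front-insert while padding; padding becomes a single list prepend.
import Mathlib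
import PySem

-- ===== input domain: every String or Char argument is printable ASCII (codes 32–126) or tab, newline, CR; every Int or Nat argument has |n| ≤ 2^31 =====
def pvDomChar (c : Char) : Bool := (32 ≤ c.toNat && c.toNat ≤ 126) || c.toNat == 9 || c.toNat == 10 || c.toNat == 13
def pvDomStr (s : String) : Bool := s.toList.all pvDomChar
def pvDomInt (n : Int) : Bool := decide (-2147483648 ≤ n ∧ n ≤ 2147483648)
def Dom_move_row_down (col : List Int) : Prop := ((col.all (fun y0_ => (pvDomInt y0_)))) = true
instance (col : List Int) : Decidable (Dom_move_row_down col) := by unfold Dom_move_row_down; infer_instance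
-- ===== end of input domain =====

-- B: one forward pass with an accumulator and a last_was_merged flag (zero-skipping fused in)
-- replaces A's filter loop + index-jumping merge + front-insert padding loop; same values, more idiomatic.

-- ===== PORT A =====
-- first loop: collect the non-zero numbers
def mrdFilter (col : List Int) : List Int :=
  col.foldl (fun acc number => if number ≠ 0 then acc ++ [number] else acc) []

-- the index-jumping while loop: looks at the next element, merges equal neighbours once, skips both
def mrdMerge : List Int → List Int
  | [] => []
  | [x] => [x]
  | x :: y :: rest =>
      if x = y then (x + y) :: mrdMerge rest
      else x :: mrdMerge (y :: rest)

-- the padding while loop: insert 0 at the front until length 4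
def mrdPad (m : List Int) : List Int :=
  if m.length < 4 then mrdPad (0 :: m) else m
termination_by 4 - m.length

def move_row_down (col : List Int) : List Int :=
  mrdPad (mrdMerge (mrdFilter col))

-- ===== PORT B =====
-- loop body of Source B: state = (result, last_merged)
def altStep (s : List Int × Bool) (n : Int) : List Int × Bool :=
  if n ≠ 0 then
    if s.1.getLast? = some n ∧ s.2 = false then (s.1.dropLast ++ [n + n], true)
    else (s.1 ++ [n], false)
  else s

def move_row_down_alt (col : List Int) : List Int :=
  List.replicate (4 - (col.foldl altStep ([], false)).1.length) 0
    ++ (col.foldl altStep ([], false)).1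

-- ===== PRECONDITION & SPEC =====
def Spec_move_row_down (col : List Int) (out : List Int) : Prop := out = move_row_down_alt col
instance (col : List Int) (out : List Int) : Decidable (Spec_move_row_down col out) := by unfold Spec_move_row_down; infer_instance

-- ===== CLAIM (what is proved, stated in full; the proofs are below) =====
def Claim_equal_move_row_down : Prop := ∀ (col : List Int), Dom_move_row_down col → Spec_move_row_down col (move_row_down col)

-- ===== LEMMAS AND PROOFS =====

-- A's filter loop is List.filter
theorem mrdFilter_eq (col : List Int) :
    mrdFilter col = col.filter (fun n => decide (n ≠ 0)) := by
  have h : ∀ (l acc : List Int),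
      l.foldl (fun acc number => if number ≠ 0 then acc ++ [number] else acc) acc
        = acc ++ l.filter (fun n => decide (n ≠ 0)) := by
    intro l
    induction l with
    | nil => simp
    | cons x xs ih =>
        intro acc
        rw [List.foldl_cons]
        by_cases hx : x = 0
        · rw [if_neg (by simp [hx]), ih]
          simp [hx]
        · rw [if_pos hx, ih]
          simp [hx]
  simpa [mrdFilter] using h col []

-- B's fold skips zeros, so it only sees the filtered list
theorem foldl_altStep_filter (l : List Int) (s : List Int × Bool) :
    l.foldl altStep s = (l.filter (fun n => decide (n ≠ 0))).foldl altStep s := by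
  induction l generalizing s with
  | nil => rfl
  | cons x xs ih =>
      by_cases hx : x = 0
      · simp [hx, altStep, List.foldl_cons, ih]
      · simp [hx, List.foldl_cons, ih]

-- the flag invariant on a list of non-zero tiles
theorem altStep_invariant (l : List Int) (hl : ∀ x ∈ l, x ≠ 0) :
    (∀ res : List Int, (l.foldl altStep (res, true)).1 = res ++ mrdMerge l) ∧
    (∀ (res : List Int) (x : Int),
      (l.foldl altStep (res ++ [x], false)).1 = res ++ mrdMerge (x :: l)) := by
  induction l with
  | nil => simp [mrdMerge]
  | cons z l ih =>
      have hz : z ≠ 0 := hl z (by simp)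
      have hl' : ∀ x ∈ l, x ≠ 0 := fun x hx => hl x (by simp [hx])
      obtain ⟨ih1, ih2⟩ := ih hl'
      constructor
      · intro res
        have : altStep (res, true) z = (res ++ [z], false) := by
          simp [altStep, hz]
        rw [List.foldl_cons, this, ih2]
      · intro res x
        by_cases hxz : x = z
        · have : altStep (res ++ [x], false) z = (res ++ [x + z], true) := by
            simp [altStep, hz, hxz]
          rw [List.foldl_cons, this, ih1]
          simp [mrdMerge, hxz, List.append_assoc]
        · have : altStep (res ++ [x], false) z = ((res ++ [x]) ++ [z], false) := by
            simp [altStep, hz, hxz]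
          rw [List.foldl_cons, this, ih2]
          simp [mrdMerge, hxz, List.append_assoc]

-- the fold from the initial state computes A's merge of the non-zero tiles
theorem foldl_altStep_merge (l : List Int) (hl : ∀ x ∈ l, x ≠ 0) :
    (l.foldl altStep ([], false)).1 = mrdMerge l := by
  cases l with
  | nil => rfl
  | cons x xs =>
      have hx : x ≠ 0 := hl x (by simp)
      have hxs : ∀ y ∈ xs, y ≠ 0 := fun y hy => hl y (by simp [hy])
      have step1 : altStep (([] : List Int), false) x = ([x], false) := by
        simp [altStep, hx]
      rw [List.foldl_cons, step1]
      simpa using (altStep_invariant xs hxs).2 [] x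

-- A's padding loop front-pads with zeros to length 4
theorem mrdPad_eq (m : List Int) :
    mrdPad m = List.replicate (4 - m.length) 0 ++ m := by
  rcases m with _ | ⟨a, _ | ⟨b, _ | ⟨c, _ | ⟨d, t⟩⟩⟩⟩
  · rw [mrdPad, if_pos (by simp), mrdPad, if_pos (by simp), mrdPad, if_pos (by simp),
        mrdPad, if_pos (by simp), mrdPad, if_neg (by simp)]
    rfl
  · rw [mrdPad, if_pos (by simp), mrdPad, if_pos (by simp), mrdPad, if_pos (by simp),
        mrdPad, if_neg (by simp)]
    rfl
  · rw [mrdPad, if_pos (by simp), mrdPad, if_pos (by simp), mrdPad, if_neg (by simp)]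
    rfl
  · rw [mrdPad, if_pos (by simp), mrdPad, if_neg (by simp)]
    rfl
  · rw [mrdPad, if_neg (by simp only [List.length_cons]; omega)]
    have h : 4 - (a :: b :: c :: d :: t).length = 0 := by
      simp only [List.length_cons]; omega
    rw [h]
    rfl

-- ===== VERDICT (by name: the statement is the Claim_ definition above) =====
theorem move_row_down_spec : Claim_equal_move_row_down := by
  intro col _
  unfold Spec_move_row_down move_row_down move_row_down_alt
  rw [foldl_altStep_filter, mrdFilter_eq,
      foldl_altStep_merge _ (by intro x hx; simpa using (List.mem_filter.mp hx).2),
      mrdPad_eq]
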